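-- pv_equiv track=rewrite | github.com/keithkahurakamau/HMS-2 | backend/app/core/modules.py | url_to_module
-- ===== SOURCE A (Python) =====
-- from typing import Dict, Iterable, List, Optional, Tuple
--
-- URL_PREFIX_MAP: Tuple[Tuple[str, str], ...] = (
--     # always-on routes — listed first for clarity, gate.py short-circuits them.
--     ("/api/auth/",                        "auth"),
--     ("/api/users/",                       "users"),
--     ("/api/admin/",                       "users"),
--     ("/api/me/",                          "users"),
--     ("/api/support/",                     "support"),
--     ("/api/notifications/",               "notifications"),
--     ("/api/messaging/",                   "messaging"),
--     ("/api/dashboard/",                   "dashboard"),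
--     ("/api/settings/",                    "settings"),
--     ("/api/patients/",                    "patients"),
--     ("/api/appointments/",                "appointments"),
--     ("/api/queue/",                       "patients"),
--     # optional modules.
--     ("/api/clinical/",                    "clinical"),
--     ("/api/laboratory/",                  "laboratory"),
--     ("/api/radiology/",                   "radiology"),
--     ("/api/pharmacy/",                    "pharmacy"),
--     ("/api/inventory/",                   "inventory"),
--     ("/api/wards/",                       "wards"),
--     ("/api/billing/",                     "billing"),
--     ("/api/cheques/",                     "cheques"),
--     ("/api/medical-history/",             "medical_history"),
--     ("/api/medical_history/",             "medical_history"),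
--     ("/api/mpesa/",                       "mpesa"),
--     ("/api/analytics/",                   "analytics"),
--     ("/api/patient-portal/",              "patient_portal"),
--     ("/api/branding/",                    "branding"),
--     ("/api/referrals/",                   "referrals"),
--     ("/api/privacy/",                     "privacy"),
-- )
--
-- def url_to_module(path: str) -> Optional[str]:
--     """Return the module key responsible for *path*, or None for paths that
--     fall outside the gated surface (public, websocket, health check, etc.)."""
--     if not path.startswith("/api/"):
--         return None
--     if path.startswith("/api/public/"):
--         return None
--     for prefix, mod in URL_PREFIX_MAP:
--         if path.startswith(prefix):
--             return mod
--     return None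
-- ===== SOURCE B (Python) =====
-- # One forward scan over the characters after "/api/": accumulate the first
-- # URL segment, and at the first "/" resolve it with an explicit decision
-- # chain.  No prefix-table scan; "public" simply has no branch.
-- from typing import Optional
--
-- def _module_of(seg: str) -> Optional[str]:
--     if seg == "auth": return "auth"
--     elif seg == "users": return "users"
--     elif seg == "admin": return "users"
--     elif seg == "me": return "users"
--     elif seg == "support": return "support"
--     elif seg == "notifications": return "notifications"
--     elif seg == "messaging": return "messaging"
--     elif seg == "dashboard": return "dashboard"
--     elif seg == "settings": return "settings"
--     elif seg == "patients": return "patients"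
--     elif seg == "appointments": return "appointments"
--     elif seg == "queue": return "patients"
--     elif seg == "clinical": return "clinical"
--     elif seg == "laboratory": return "laboratory"
--     elif seg == "radiology": return "radiology"
--     elif seg == "pharmacy": return "pharmacy"
--     elif seg == "inventory": return "inventory"
--     elif seg == "wards": return "wards"
--     elif seg == "billing": return "billing"
--     elif seg == "cheques": return "cheques"
--     elif seg == "medical-history": return "medical_history"
--     elif seg == "medical_history": return "medical_history"
--     elif seg == "mpesa": return "mpesa"
--     elif seg == "analytics": return "analytics"
--     elif seg == "patient-portal": return "patient_portal"
--     elif seg == "branding": return "branding"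
--     elif seg == "referrals": return "referrals"
--     elif seg == "privacy": return "privacy"
--     else: return None
--
-- def url_to_module(path: str) -> Optional[str]:
--     if not path.startswith("/api/"):
--         return None
--     seg = ""
--     for ch in path[5:]:
--         if ch == "/":
--             return _module_of(seg)
--         seg += ch
--     return None
-- ===== Notes on version B (the rewrite author's own statement) =====
-- stated objective: alternative
-- what changed: Replaces A's linear startswith-scan over the 28-entry prefix table with a single forward character scan that extracts the first URL segment after the api prefix and resolves it by an explicit segment decision chain; A's public early-exit disappears because that segment simply has no branch.
import Mathlib
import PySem

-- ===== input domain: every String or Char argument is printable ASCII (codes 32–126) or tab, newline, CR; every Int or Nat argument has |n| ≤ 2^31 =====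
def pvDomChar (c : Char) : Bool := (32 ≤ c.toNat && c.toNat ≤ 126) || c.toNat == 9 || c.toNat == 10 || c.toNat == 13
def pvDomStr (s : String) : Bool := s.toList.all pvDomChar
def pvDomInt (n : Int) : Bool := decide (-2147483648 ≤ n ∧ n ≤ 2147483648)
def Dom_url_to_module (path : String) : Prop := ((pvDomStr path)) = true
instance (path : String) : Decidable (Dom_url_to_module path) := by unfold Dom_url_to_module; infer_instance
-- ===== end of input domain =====

-- B replaces A's linear startswith-scan over 28 "/api/…" prefixes by one forward
-- character scan that extracts the first segment after "/api/" and resolves it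
-- with an explicit segment decision chain (alternative decomposition, same cost).

-- ===== PORT A =====
def URL_PREFIX_MAP : List (String × String) := [
  ("/api/auth/", "auth"), ("/api/users/", "users"), ("/api/admin/", "users"),
  ("/api/me/", "users"), ("/api/support/", "support"),
  ("/api/notifications/", "notifications"), ("/api/messaging/", "messaging"),
  ("/api/dashboard/", "dashboard"), ("/api/settings/", "settings"),
  ("/api/patients/", "patients"), ("/api/appointments/", "appointments"),
  ("/api/queue/", "patients"), ("/api/clinical/", "clinical"),
  ("/api/laboratory/", "laboratory"), ("/api/radiology/", "radiology"),
  ("/api/pharmacy/", "pharmacy"), ("/api/inventory/", "inventory"),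
  ("/api/wards/", "wards"), ("/api/billing/", "billing"),
  ("/api/cheques/", "cheques"), ("/api/medical-history/", "medical_history"),
  ("/api/medical_history/", "medical_history"), ("/api/mpesa/", "mpesa"),
  ("/api/analytics/", "analytics"), ("/api/patient-portal/", "patient_portal"),
  ("/api/branding/", "branding"), ("/api/referrals/", "referrals"),
  ("/api/privacy/", "privacy")]

-- the 'for prefix, mod in URL_PREFIX_MAP' loop: first matching prefix wins
def findPrefixA : List (String × String) → String → Option String
  | [], _ => none
  | (pre, m) :: rest, path =>
      if PySem.Str.startswith path pre then some m else findPrefixA rest path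

def url_to_module (path : String) : Option String :=
  if !(PySem.Str.startswith path "/api/") then none
  else if PySem.Str.startswith path "/api/public/" then none
  else findPrefixA URL_PREFIX_MAP path

-- ===== PORT B =====
-- the '_module_of' if/elif decision chain of Source B
def moduleOf (seg : String) : Option String :=
  if seg = "auth" then some "auth"
  else if seg = "users" then some "users"
  else if seg = "admin" then some "users"
  else if seg = "me" then some "users"
  else if seg = "support" then some "support"
  else if seg = "notifications" then some "notifications"
  else if seg = "messaging" then some "messaging"
  else if seg = "dashboard" then some "dashboard"
  else if seg = "settings" then some "settings"
  else if seg = "patients" then some "patients"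
  else if seg = "appointments" then some "appointments"
  else if seg = "queue" then some "patients"
  else if seg = "clinical" then some "clinical"
  else if seg = "laboratory" then some "laboratory"
  else if seg = "radiology" then some "radiology"
  else if seg = "pharmacy" then some "pharmacy"
  else if seg = "inventory" then some "inventory"
  else if seg = "wards" then some "wards"
  else if seg = "billing" then some "billing"
  else if seg = "cheques" then some "cheques"
  else if seg = "medical-history" then some "medical_history"
  else if seg = "medical_history" then some "medical_history"
  else if seg = "mpesa" then some "mpesa"
  else if seg = "analytics" then some "analytics"
  else if seg = "patient-portal" then some "patient_portal"
  else if seg = "branding" then some "branding"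
  else if seg = "referrals" then some "referrals"
  else if seg = "privacy" then some "privacy"
  else none

-- the 'for ch in path[5:]' loop of Source B: accumulate the segment, decide at the first '/'
def segLoop : List Char → String → Option String
  | [], _ => none
  | c :: rest, seg => if c = '/' then moduleOf seg else segLoop rest (seg.push c)

def url_to_module_alt (path : String) : Option String :=
  if !(PySem.Str.startswith path "/api/") then none
  else segLoop (PySem.Str.slice path (some 5) none).toList ""

-- ===== PRECONDITION & SPEC =====
def Spec_url_to_module (path : String) (out : Option String) : Prop := out = url_to_module_alt path
instance (path : String) (out : Option String) : Decidable (Spec_url_to_module path out) := by unfold Spec_url_to_module; infer_instance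

-- ===== CLAIM (what is proved, stated in full; the proofs are below) =====
def Claim_equal_url_to_module : Prop := ∀ (path : String), Dom_url_to_module path → Spec_url_to_module path (url_to_module path)

-- ===== LEMMAS AND PROOFS =====

-- proof-only: the segment → module table, in A's order
def SEGLIST : List (String × String) := [
  ("auth", "auth"), ("users", "users"), ("admin", "users"), ("me", "users"),
  ("support", "support"), ("notifications", "notifications"),
  ("messaging", "messaging"), ("dashboard", "dashboard"),
  ("settings", "settings"), ("patients", "patients"),
  ("appointments", "appointments"), ("queue", "patients"),
  ("clinical", "clinical"), ("laboratory", "laboratory"),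
  ("radiology", "radiology"), ("pharmacy", "pharmacy"),
  ("inventory", "inventory"), ("wards", "wards"), ("billing", "billing"),
  ("cheques", "cheques"), ("medical-history", "medical_history"),
  ("medical_history", "medical_history"), ("mpesa", "mpesa"),
  ("analytics", "analytics"), ("patient-portal", "patient_portal"),
  ("branding", "branding"), ("referrals", "referrals"), ("privacy", "privacy")]

-- a slash-free segment followed by '/' matches a "seg ++ '/' :: tail" path iff the segments coincide
lemma seg_match : ∀ (seg s t : List Char), '/' ∉ seg → '/' ∉ s →
    ((seg ++ ['/']) <+: (s ++ '/' :: t) ↔ seg = s) := by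
  intro seg
  induction seg with
  | nil =>
    intro s t _ hs
    cases s with
    | nil => simp
    | cons c s' =>
      simp only [List.nil_append, List.cons_append, List.cons_prefix_cons]
      constructor
      · rintro ⟨rfl, -⟩; exact absurd (List.mem_cons_self ..) hs
      · intro h; exact absurd h (by simp)
  | cons a seg' ih =>
    intro s t hseg hs
    cases s with
    | nil =>
      simp only [List.cons_append, List.nil_append, List.cons_prefix_cons]
      constructor
      · rintro ⟨rfl, -⟩; exact absurd (List.mem_cons_self ..) hseg
      · intro h; exact absurd h (by simp)
    | cons c s' =>
      simp only [List.cons_append, List.cons_prefix_cons]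
      rw [ih s' t (fun h => hseg (List.mem_cons_of_mem _ h)) (fun h => hs (List.mem_cons_of_mem _ h))]
      simp

lemma startswith_cancel (path p : String) (t q : List Char)
    (hpath : path.toList = "/api/".toList ++ t) (hp : p.toList = "/api/".toList ++ q) :
    (PySem.Str.startswith path p = true) ↔ q <+: t := by
  rw [PySem.Str.startswith_eq, PySem.Chars.startswith_iff, hpath, hp,
      List.prefix_append_right_inj]

lemma findPrefixA_none (path : String) (t : List Char)
    (hpath : path.toList = "/api/".toList ++ t) (hno : '/' ∉ t) :
    ∀ pairs : List (String × String),
      (∀ pm ∈ pairs, pm.1.toList = "/api/".toList ++ (((pm.1.toList.drop 5).dropLast) ++ ['/'])) →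
      findPrefixA pairs path = none := by
  intro pairs
  induction pairs with
  | nil => intro _; rfl
  | cons pm tl ih =>
    intro h
    obtain ⟨p, m⟩ := pm
    have hp := h (p, m) (List.mem_cons_self ..)
    have hsw : PySem.Str.startswith path p = false := by
      by_contra hne
      have htrue : PySem.Str.startswith path p = true := by
        cases hx : PySem.Str.startswith path p
        · exact absurd hx hne
        · rfl
      have hpre := (startswith_cancel path p t _ hpath hp).mp htrue
      exact hno (hpre.subset (by simp))
    simp only [findPrefixA, hsw, Bool.false_eq_true, if_false]
    exact ih (fun q hq => h q (List.mem_cons_of_mem _ hq))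

lemma loopA_eq (path : String) (s u : List Char) (hs : '/' ∉ s)
    (hpath : path.toList = "/api/".toList ++ (s ++ '/' :: u)) :
    ∀ pairs : List (String × String),
      (∀ pm ∈ pairs, '/' ∉ ((pm.1.toList.drop 5).dropLast) ∧
          pm.1.toList = "/api/".toList ++ (((pm.1.toList.drop 5).dropLast) ++ ['/'])) →
      findPrefixA pairs path =
        Option.map (fun q => q.2)
          ((pairs.map (fun pm => ((pm.1.toList.drop 5).dropLast, pm.2))).find?
            (fun q => q.1 == s)) := by
  intro pairs
  induction pairs with
  | nil => intro _; rfl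
  | cons pm tl ih =>
    intro h
    obtain ⟨p, m⟩ := pm
    obtain ⟨hpseg, hpdec⟩ := h (p, m) (List.mem_cons_self ..)
    have hsw : (PySem.Str.startswith path p = true) ↔ (p.toList.drop 5).dropLast = s := by
      rw [startswith_cancel path p _ _ hpath hpdec]
      exact seg_match _ s u hpseg hs
    by_cases hc : (p.toList.drop 5).dropLast = s
    · have h1 : PySem.Str.startswith path p = true := hsw.mpr hc
      simp only [findPrefixA, h1, if_true, List.map_cons]
      rw [List.find?_cons_of_pos (by simpa using hc)]
      rfl
    · have h1 : PySem.Str.startswith path p = false := by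
        cases hx : PySem.Str.startswith path p
        · rfl
        · exact absurd (hsw.mp hx) hc
      simp only [findPrefixA, h1, Bool.false_eq_true, if_false, List.map_cons]
      rw [List.find?_cons_of_neg (by simpa using hc)]
      exact ih (fun q hq => h q (List.mem_cons_of_mem _ hq))

lemma find?_toList (l : List (String × String)) (segStr : String) (s : List Char)
    (h : segStr.toList = s) :
    Option.map (fun q => q.2) (l.find? (fun q => q.1 == segStr)) =
    Option.map (fun q => q.2)
      ((l.map (fun kv => (kv.1.toList, kv.2))).find? (fun q => q.1 == s)) := by
  induction l with
  | nil => rfl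
  | cons kv tl ih =>
    obtain ⟨k, v⟩ := kv
    by_cases hk : k = segStr
    · subst hk
      rw [List.find?_cons_of_pos (by simp), List.map_cons,
          List.find?_cons_of_pos (by simp [h])]
      rfl
    · have hk' : k.toList ≠ s := by
        rw [← h]; intro he; exact hk (String.toList_inj.mp he)
      rw [List.find?_cons_of_neg (by simp [hk]), List.map_cons,
          List.find?_cons_of_neg (by simp [hk'])]
      exact ih

lemma api_chars : "/api/".toList = ['/', 'a', 'p', 'i', '/'] := by decide

lemma mapEq :
    URL_PREFIX_MAP.map (fun pm => ((pm.1.toList.drop 5).dropLast, pm.2)) =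
    SEGLIST.map (fun kv => (kv.1.toList, kv.2)) := by decide

lemma url_pairs_shape :
    ∀ pm ∈ URL_PREFIX_MAP, '/' ∉ ((pm.1.toList.drop 5).dropLast) ∧
      pm.1.toList = "/api/".toList ++ (((pm.1.toList.drop 5).dropLast) ++ ['/']) := by decide

-- the decision chain agrees with a first-match scan over SEGLIST
lemma chain_eq (seg : String) :
    Option.map (fun q => q.2) (SEGLIST.find? (fun q => q.1 == seg)) = moduleOf seg := by
  unfold SEGLIST moduleOf
  by_cases h0 : seg = "auth"
  · subst h0; decide
  rw [List.find?_cons_of_neg (by simp [Ne.symm h0]), if_neg h0]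
  by_cases h1 : seg = "users"
  · subst h1; decide
  rw [List.find?_cons_of_neg (by simp [Ne.symm h1]), if_neg h1]
  by_cases h2 : seg = "admin"
  · subst h2; decide
  rw [List.find?_cons_of_neg (by simp [Ne.symm h2]), if_neg h2]
  by_cases h3 : seg = "me"
  · subst h3; decide
  rw [List.find?_cons_of_neg (by simp [Ne.symm h3]), if_neg h3]
  by_cases h4 : seg = "support"
  · subst h4; decide
  rw [List.find?_cons_of_neg (by simp [Ne.symm h4]), if_neg h4]
  by_cases h5 : seg = "notifications"
  · subst h5; decide
  rw [List.find?_cons_of_neg (by simp [Ne.symm h5]), if_neg h5]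
  by_cases h6 : seg = "messaging"
  · subst h6; decide
  rw [List.find?_cons_of_neg (by simp [Ne.symm h6]), if_neg h6]
  by_cases h7 : seg = "dashboard"
  · subst h7; decide
  rw [List.find?_cons_of_neg (by simp [Ne.symm h7]), if_neg h7]
  by_cases h8 : seg = "settings"
  · subst h8; decide
  rw [List.find?_cons_of_neg (by simp [Ne.symm h8]), if_neg h8]
  by_cases h9 : seg = "patients"
  · subst h9; decide
  rw [List.find?_cons_of_neg (by simp [Ne.symm h9]), if_neg h9]
  by_cases h10 : seg = "appointments"
  · subst h10; decide
  rw [List.find?_cons_of_neg (by simp [Ne.symm h10]), if_neg h10]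
  by_cases h11 : seg = "queue"
  · subst h11; decide
  rw [List.find?_cons_of_neg (by simp [Ne.symm h11]), if_neg h11]
  by_cases h12 : seg = "clinical"
  · subst h12; decide
  rw [List.find?_cons_of_neg (by simp [Ne.symm h12]), if_neg h12]
  by_cases h13 : seg = "laboratory"
  · subst h13; decide
  rw [List.find?_cons_of_neg (by simp [Ne.symm h13]), if_neg h13]
  by_cases h14 : seg = "radiology"
  · subst h14; decide
  rw [List.find?_cons_of_neg (by simp [Ne.symm h14]), if_neg h14]
  by_cases h15 : seg = "pharmacy"
  · subst h15; decide
  rw [List.find?_cons_of_neg (by simp [Ne.symm h15]), if_neg h15]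
  by_cases h16 : seg = "inventory"
  · subst h16; decide
  rw [List.find?_cons_of_neg (by simp [Ne.symm h16]), if_neg h16]
  by_cases h17 : seg = "wards"
  · subst h17; decide
  rw [List.find?_cons_of_neg (by simp [Ne.symm h17]), if_neg h17]
  by_cases h18 : seg = "billing"
  · subst h18; decide
  rw [List.find?_cons_of_neg (by simp [Ne.symm h18]), if_neg h18]
  by_cases h19 : seg = "cheques"
  · subst h19; decide
  rw [List.find?_cons_of_neg (by simp [Ne.symm h19]), if_neg h19]
  by_cases h20 : seg = "medical-history"
  · subst h20; decide
  rw [List.find?_cons_of_neg (by simp [Ne.symm h20]), if_neg h20]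
  by_cases h21 : seg = "medical_history"
  · subst h21; decide
  rw [List.find?_cons_of_neg (by simp [Ne.symm h21]), if_neg h21]
  by_cases h22 : seg = "mpesa"
  · subst h22; decide
  rw [List.find?_cons_of_neg (by simp [Ne.symm h22]), if_neg h22]
  by_cases h23 : seg = "analytics"
  · subst h23; decide
  rw [List.find?_cons_of_neg (by simp [Ne.symm h23]), if_neg h23]
  by_cases h24 : seg = "patient-portal"
  · subst h24; decide
  rw [List.find?_cons_of_neg (by simp [Ne.symm h24]), if_neg h24]
  by_cases h25 : seg = "branding"
  · subst h25; decide
  rw [List.find?_cons_of_neg (by simp [Ne.symm h25]), if_neg h25]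
  by_cases h26 : seg = "referrals"
  · subst h26; decide
  rw [List.find?_cons_of_neg (by simp [Ne.symm h26]), if_neg h26]
  by_cases h27 : seg = "privacy"
  · subst h27; decide
  rw [List.find?_cons_of_neg (by simp [Ne.symm h27]), if_neg h27]
  rfl

-- every list containing '/' splits at its first slash
lemma first_slash : ∀ t : List Char, '/' ∈ t → ∃ s u, t = s ++ '/' :: u ∧ '/' ∉ s := by
  intro t
  induction t with
  | nil => intro h; exact absurd h (by simp)
  | cons c rest ih =>
    intro hmem
    by_cases hc : c = '/'
    · exact ⟨[], rest, by simp [hc], by simp⟩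
    · have hm : '/' ∈ rest := by
        rcases List.mem_cons.mp hmem with h | h
        · exact absurd h.symm hc
        · exact h
      obtain ⟨s, u, hsu, hns⟩ := ih hm
      refine ⟨c :: s, u, by simp [hsu], ?_⟩
      intro hx
      rcases List.mem_cons.mp hx with h | h
      · exact hc h.symm
      · exact hns h

lemma segLoop_no_slash : ∀ (t : List Char) (acc : String), '/' ∉ t → segLoop t acc = none := by
  intro t
  induction t with
  | nil => intro _ _; rfl
  | cons c rest ih =>
    intro acc h
    have hc : ¬ c = '/' := fun hc => h (by simp [hc])
    simp only [segLoop, hc, if_false]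
    exact ih _ (fun hm => h (List.mem_cons_of_mem _ hm))

lemma segLoop_slash (u : List Char) (acc : String) :
    segLoop ('/' :: u) acc = moduleOf acc := by
  simp [segLoop]

lemma segLoop_found : ∀ (s : List Char) (u : List Char) (acc : String), '/' ∉ s →
    segLoop (s ++ '/' :: u) acc = moduleOf (String.ofList (acc.toList ++ s)) := by
  intro s
  induction s with
  | nil =>
    intro u acc _
    rw [List.nil_append, segLoop_slash, List.append_nil, String.ofList_toList]
  | cons c s' ih =>
    intro u acc h
    have hc : ¬ c = '/' := fun hc => h (by simp [hc])
    simp only [List.cons_append, segLoop, hc, if_false]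
    rw [ih u (acc.push c) (fun hm => h (List.mem_cons_of_mem _ hm))]
    congr 1
    rw [String.toList_push, List.append_assoc]
    rfl

-- ===== VERDICT (by name: the statement is the Claim_ definition above) =====
theorem url_to_module_spec : Claim_equal_url_to_module := by
  intro path _
  unfold Spec_url_to_module
  by_cases h5 : PySem.Str.startswith path "/api/" = true
  case neg =>
    have h5' : PySem.Str.startswith path "/api/" = false := by
      cases hx : PySem.Str.startswith path "/api/"
      · rfl
      · exact absurd hx h5
    simp only [url_to_module, url_to_module_alt, h5', Bool.not_false, if_true]
  case pos =>
    have hpre : "/api/".toList <+: path.toList := by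
      rw [PySem.Str.startswith_eq, PySem.Chars.startswith_iff] at h5
      exact h5
    obtain ⟨t, ht⟩ := hpre
    have hpath : path.toList = "/api/".toList ++ t := ht.symm
    have hrest : (PySem.Str.slice path (some 5) none).toList = t := by
      rw [PySem.Str.toList_slice, PySem.Chars.slice_eq_listSlice,
          PySem.List.slice_from _ (by norm_num), hpath, api_chars]
      rfl
    by_cases hm : '/' ∈ t
    · obtain ⟨s, u, hsu, hns⟩ := first_slash t hm
      have hB : segLoop (PySem.Str.slice path (some 5) none).toList "" =
          moduleOf (String.ofList s) := by
        rw [hrest, hsu, segLoop_found s u "" hns]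
        rfl
      have hBchain : moduleOf (String.ofList s) =
          Option.map (fun q => q.2)
            ((SEGLIST.map (fun kv => (kv.1.toList, kv.2))).find? (fun q => q.1 == s)) := by
        rw [← chain_eq (String.ofList s)]
        exact find?_toList _ _ _ String.toList_ofList
      have hpubiff : (PySem.Str.startswith path "/api/public/" = true) ↔
          "public".toList = s := by
        rw [startswith_cancel path "/api/public/" t ("public".toList ++ ['/'])
          hpath (by decide)]
        rw [hsu]
        exact seg_match "public".toList s u (by decide) hns
      by_cases hpub : "public".toList = s
      · have h2 : PySem.Str.startswith path "/api/public/" = true := hpubiff.mpr hpub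
        have hBnone : moduleOf (String.ofList s) = none := by
          rw [← hpub]
          decide
        simp only [url_to_module, url_to_module_alt, h5, Bool.not_true, Bool.false_eq_true,
          if_false, h2, if_true, hB, hBnone]
      · have h2 : PySem.Str.startswith path "/api/public/" = false := by
          cases hx : PySem.Str.startswith path "/api/public/"
          · rfl
          · exact absurd (hpubiff.mp hx) hpub
        have hA := loopA_eq path s u hns (by rw [hpath, hsu]) URL_PREFIX_MAP url_pairs_shape
        rw [mapEq] at hA
        simp only [url_to_module, url_to_module_alt, h5, Bool.not_true, Bool.false_eq_true,
          if_false, h2, hA, hB, hBchain]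
    · have hA := findPrefixA_none path t hpath hm URL_PREFIX_MAP
        (fun pm hmm => (url_pairs_shape pm hmm).2)
      have hpub : PySem.Str.startswith path "/api/public/" = false := by
        by_contra hne
        have htrue : PySem.Str.startswith path "/api/public/" = true := by
          cases hx : PySem.Str.startswith path "/api/public/"
          · exact absurd hx hne
          · rfl
        have hq := (startswith_cancel path "/api/public/" t ("public".toList ++ ['/'])
          hpath (by decide)).mp htrue
        exact hm (hq.subset (by decide))
      have hBnone : segLoop (PySem.Str.slice path (some 5) none).toList "" = none := by
        rw [hrest]; exact segLoop_no_slash t "" hm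
      simp only [url_to_module, url_to_module_alt, h5, Bool.not_true, Bool.false_eq_true,
        if_false, hpub, hA, hBnone]
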